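-- pv_equiv track=rewrite | github.com/twinklecherry/pythonAlgorithms | stack_queue/1.py | solution
-- ===== SOURCE A (Python) =====
-- def solution(progresses, speeds):
--     answer = []
--     while progresses:
--         cnt = 0
--         for i in range(len(progresses)):
--             progresses[i] += speeds[i]
--         if progresses[0] >= 100:
--             while progresses:
--                 if progresses[0] >= 100:
--                     progresses.pop(0)
--                     speeds.pop(0)
--                     cnt += 1
--                 else:
--                     break
--             answer.append(cnt)
--     return answer
-- ===== SOURCE B (Python) =====
-- def solution(progresses, speeds):
--     # completion day per task: ceil((100 - p) / s), at least 1 (a day passes before the first check)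
--     days = [max(1, -((p - 100) // s)) for p, s in zip(progresses, speeds)]
--     answer = []
--     i = 0
--     n = len(days)
--     while i < n:
--         j = i + 1
--         while j < n and days[j] <= days[i]:
--             j += 1
--         answer.append(j - i)
--         i = j
--     return answer
-- ===== Notes on version B (the rewrite author's own statement) =====
-- stated objective: faster
-- what changed: Replaces A's day-by-day simulation (incrementing every task each day and pop(0)-shifting both lists) by the closed-form completion day ceil((100-p)/s) per task followed by a single index-based grouping pass; intended as faster — a timing run saw A time out at n=16 where B returned, but could not measure a ratio.
-- outside the precondition, e.g. on solution([100], [0]): A returns [1], B raises ZeroDivisionError; on solution([150], [-10]): A returns [1], B returns [1]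
import Mathlib
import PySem

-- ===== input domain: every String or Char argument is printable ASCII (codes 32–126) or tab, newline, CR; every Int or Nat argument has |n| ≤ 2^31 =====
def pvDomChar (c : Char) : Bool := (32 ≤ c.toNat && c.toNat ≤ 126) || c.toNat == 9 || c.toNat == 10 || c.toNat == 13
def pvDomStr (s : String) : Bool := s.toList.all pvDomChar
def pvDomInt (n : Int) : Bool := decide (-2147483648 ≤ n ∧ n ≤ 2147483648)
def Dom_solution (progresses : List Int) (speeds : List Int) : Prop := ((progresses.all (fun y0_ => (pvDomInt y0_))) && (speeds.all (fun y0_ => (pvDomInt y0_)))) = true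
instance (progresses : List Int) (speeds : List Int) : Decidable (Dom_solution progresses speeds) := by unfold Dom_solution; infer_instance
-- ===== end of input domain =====

-- B replaces A's day-by-day simulation with pop(0) by the closed-form completion day
-- ceil((100-p)/s) per task and one grouping pass. Intended as faster (asymptotic: A's work
-- grows with the number of simulated days); a timing run saw A time out at n=16 where B
-- returned, but could not confirm a ratio at a size where both finish.
-- Note: Python A mutates (empties) both argument lists in place; B does not. The claim is about the return value.

-- ===== PORT A =====
-- inner `while progresses: if progresses[0] >= 100: pop;pop;cnt+=1 else break`
def popLoopA : List Int → List Int → Int → List Int × List Int × Int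
  | [], ss, cnt => ([], ss, cnt)
  | p :: rest, ss, cnt =>
    if 100 ≤ p then popLoopA rest (ss.drop 1) (cnt + 1) else (p :: rest, ss, cnt)

-- outer `while progresses:` — fuel makes the (possibly nonterminating) Python loop total;
-- under Pre_solution the fuel below is enough, so the port computes exactly what A computes there
def loopA : Nat → List Int → List Int → List Int → List Int
  | 0, _, _, ans => ans
  | fuel+1, ps, ss, ans =>
    if ps.isEmpty then ans
    else
      let ps' := ps.zipWith (fun p s => p + s) ss   -- for i in range(len): progresses[i] += speeds[i]
      if 100 ≤ ps'.headD 0 then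
        let r := popLoopA ps' ss 0
        loopA fuel r.1 r.2.1 (ans ++ [r.2.2])
      else
        loopA fuel ps' ss ans

def solution (progresses : List Int) (speeds : List Int) : List Int :=
  loopA (progresses.foldl (fun a p => a + ((100 - p).toNat + 1)) 0) progresses speeds []

-- ===== PORT B =====
-- days = [max(1, -((p - 100) // s)) for p, s in zip(progresses, speeds)]
def dayOf (p s : Int) : Int := max 1 (-(PySem.Int.floordiv (p - 100) s))

-- the index loop `while i < n: j = i+1; while j < n and days[j] <= days[i]: j += 1; append(j-i); i = j`
def groupDays : List Int → List Int
  | [] => []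
  | d :: rest =>
    ((1 : Int) + (rest.takeWhile (fun x => x ≤ d)).length) ::
      groupDays (rest.dropWhile (fun x => x ≤ d))
termination_by l => l.length
decreasing_by
  simp only [List.length_cons]
  exact Nat.lt_succ_of_le (List.length_dropWhile_le _ _)

def solution_alt (progresses : List Int) (speeds : List Int) : List Int :=
  groupDays ((progresses.zip speeds).map (fun x => dayOf x.1 x.2))

-- ===== PRECONDITION & SPEC =====
-- Pre_ excludes (a) speeds shorter than progresses, where A raises IndexError, and
-- (b) a non-positive speed among the used pairs, where A loops forever whenever that task
-- is unfinished and B's ceiling division divides by zero on s = 0.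
def Pre_solution (progresses : List Int) (speeds : List Int) : Prop :=
  progresses.length ≤ speeds.length ∧ ∀ x ∈ progresses.zip speeds, 1 ≤ x.2

instance (progresses : List Int) (speeds : List Int) : Decidable (Pre_solution progresses speeds) := by
  unfold Pre_solution; infer_instance

def pvWitness_solution : List Int × List Int := ([30, 55, 95], [30, 5, 10])

def Spec_solution (progresses : List Int) (speeds : List Int) (out : List Int) : Prop := out = solution_alt progresses speeds
instance (progresses : List Int) (speeds : List Int) (out : List Int) : Decidable (Spec_solution progresses speeds out) := by unfold Spec_solution; infer_instance

-- ===== CLAIM (what is proved, stated in full; the proofs are below) =====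
def Claim_equal_solution : Prop := ∀ (progresses : List Int) (speeds : List Int), Dom_solution progresses speeds → Pre_solution progresses speeds → Spec_solution progresses speeds (solution progresses speeds)

-- ===== LEMMAS AND PROOFS =====

-- value of a task at end of day t
def valAt (t : Int) (x : Int × Int) : Int := x.1 + t * x.2

-- the completion-day characterisation: for s ≥ 1 and day t ≥ 1, the task is done iff dayOf ≤ t
lemma dayOf_le_iff {p s t : Int} (hs : 1 ≤ s) (ht : 1 ≤ t) :
    dayOf p s ≤ t ↔ 100 ≤ p + t * s := by
  have hb : (0 : Int) < s := by omega
  have key : (-t ≤ PySem.Int.floordiv (p - 100) s) ↔ (-t) * s ≤ p - 100 :=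
    PySem.Int.le_floordiv_iff_mul_le hb
  have h2 : (-t) * s = -(t * s) := by ring
  unfold dayOf
  rw [max_le_iff]
  constructor
  · rintro ⟨-, h⟩
    have : -t ≤ PySem.Int.floordiv (p - 100) s := by omega
    have := key.mp this
    omega
  · intro h
    refine ⟨ht, ?_⟩
    have : (-t) * s ≤ p - 100 := by omega
    have := key.mpr this
    omega

lemma one_le_dayOf (p s : Int) : 1 ≤ dayOf p s := le_max_left _ _

-- fuel bound: dayOf p s ≤ (100 - p).toNat + 1 for s ≥ 1
lemma dayOf_le_bound {p s : Int} (hs : 1 ≤ s) :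
    dayOf p s ≤ (((100 - p).toNat + 1 : Nat) : Int) := by
  set q : Int := (((100 - p).toNat + 1 : Nat) : Int) with hq
  have hq1 : 1 ≤ q := by simp [hq]
  have hqge : 100 - p ≤ q := by
    have := Int.self_le_toNat (100 - p)
    push_cast [hq]; omega
  rw [dayOf_le_iff hs hq1]
  have hq0 : 0 ≤ q := by omega
  have : q * 1 ≤ q * s := by
    exact mul_le_mul_of_nonneg_left hs hq0
  nlinarith

-- takeWhile/dropWhile only depend on the predicate's values on members
lemma takeWhile_dropWhile_congr {α : Type} {p q : α → Bool} :
    ∀ (l : List α), (∀ x ∈ l, p x = q x) →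
      l.takeWhile p = l.takeWhile q ∧ l.dropWhile p = l.dropWhile q
  | [], _ => ⟨rfl, rfl⟩
  | a :: l, h => by
    have ha : p a = q a := h a (List.mem_cons_self ..)
    have ih := takeWhile_dropWhile_congr l (fun x hx => h x (List.mem_cons_of_mem _ hx))
    simp only [List.takeWhile_cons, List.dropWhile_cons, ha]
    cases q a <;> simp [ih.1, ih.2]

-- the pointwise update step: zipWith (+) advances every task one day
lemma addStep_eq : ∀ (L : List (Int × Int)) (t : Int) (ex : List Int),
    (L.map (valAt t)).zipWith (fun p s => p + s) (L.map Prod.snd ++ ex)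
      = L.map (valAt (t + 1))
  | [], _, _ => rfl
  | x :: L, t, ex => by
    simp only [List.map_cons, List.cons_append, List.zipWith_cons_cons, addStep_eq L t ex,
      valAt]
    have h2 : x.1 + t * x.2 + x.2 = x.1 + (t + 1) * x.2 := by ring
    rw [h2]

-- the inner pop loop removes exactly the completed prefix
lemma popLoopA_eq (t : Int) :
    ∀ (L : List (Int × Int)) (ex : List Int) (c : Int),
    popLoopA (L.map (valAt t)) (L.map Prod.snd ++ ex) c
      = ((L.dropWhile (fun x => decide (100 ≤ valAt t x))).map (valAt t),
         (L.dropWhile (fun x => decide (100 ≤ valAt t x))).map Prod.snd ++ ex,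
         c + ((L.takeWhile (fun x => decide (100 ≤ valAt t x))).length : Int))
  | [], ex, c => by simp [popLoopA]
  | x :: L, ex, c => by
    by_cases hx : 100 ≤ valAt t x
    · have ih := popLoopA_eq t L ex (c + 1)
      simp only [List.map_cons, List.cons_append, popLoopA, List.drop_one,
        List.tail_cons, List.takeWhile_cons, List.dropWhile_cons, hx, decide_true,
        if_true, List.length_cons]
      rw [ih]
      simp only [Prod.mk.injEq, true_and]
      push_cast
      ring
    · simp only [List.map_cons, List.cons_append, popLoopA,
        List.takeWhile_cons, List.dropWhile_cons, hx, decide_false]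
      simp

-- the first survivor of dropWhile falsifies the predicate
lemma head?_dropWhile_false {α : Type} {p : α → Bool} :
    ∀ {l : List α} {h : α}, (l.dropWhile p).head? = some h → p h = false
  | [], h => by simp
  | a :: l, h => by
    rw [List.dropWhile_cons]
    split_ifs with ha
    · exact head?_dropWhile_false
    · intro he
      simp only [List.head?_cons, Option.some.injEq] at he
      subst he
      simpa using ha

-- MAIN: the fueled simulation from day t equals the closed-form grouping
lemma loopA_eq : ∀ (fuel : Nat) (t : Int) (L : List (Int × Int)) (ex ans : List Int),
    0 ≤ t →
    (∀ x ∈ L, 1 ≤ x.2) →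
    (∀ x ∈ L, dayOf x.1 x.2 ≤ t + (fuel : Int)) →
    (∀ h, L.head? = some h → t < dayOf h.1 h.2) →
    loopA fuel (L.map (valAt t)) (L.map Prod.snd ++ ex) ans
      = ans ++ groupDays (L.map (fun x => dayOf x.1 x.2)) := by
  intro fuel
  induction fuel with
  | zero =>
    intro t L ex ans ht hs hf hh
    cases L with
    | nil => simp [loopA, groupDays]
    | cons x rest =>
      exfalso
      have h1 := hf x (List.mem_cons_self ..)
      have h2 := hh x rfl
      simp at h1
      omega
  | succ fuel ih =>
    intro t L ex ans ht hs hf hh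
    cases L with
    | nil => simp [loopA, groupDays]
    | cons x rest =>
      have hs1 : 1 ≤ x.2 := hs x (List.mem_cons_self ..)
      have ht1 : (1 : Int) ≤ t + 1 := by omega
      have hstep := addStep_eq (x :: rest) t ex
      simp only [loopA, List.map_cons, List.cons_append, List.isEmpty_cons, Bool.false_eq_true,
        if_false]
      rw [show ((valAt t x :: List.map (valAt t) rest).zipWith (fun p s => p + s)
            (x.2 :: (List.map Prod.snd rest ++ ex)))
          = valAt (t+1) x :: List.map (valAt (t+1)) rest from by
        have := hstep
        simpa using this]
      simp only [List.headD_cons]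
      by_cases hpop : 100 ≤ valAt (t + 1) x
      · -- a group is popped at day t+1, and dayOf x = t+1
        have hdx : dayOf x.1 x.2 ≤ t + 1 := (dayOf_le_iff hs1 ht1).mpr hpop
        have hdx2 : t < dayOf x.1 x.2 := hh x rfl
        have hde : dayOf x.1 x.2 = t + 1 := by omega
        rw [if_pos hpop]
        have hpl := popLoopA_eq (t+1) (x :: rest) ex 0
        simp only [List.map_cons, List.cons_append] at hpl
        rw [hpl]
        have hcongr : ∀ y ∈ rest, (fun y => decide (100 ≤ valAt (t+1) y)) y
            = (fun y => decide (dayOf y.1 y.2 ≤ t + 1)) y := by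
          intro y hy
          have := dayOf_le_iff (p := y.1) (s := y.2) (t := t+1)
            (hs y (List.mem_cons_of_mem _ hy)) ht1
          simp only [valAt, decide_eq_decide]
          exact this.symm
        obtain ⟨htw, hdw⟩ := takeWhile_dropWhile_congr rest hcongr
        simp only [List.takeWhile_cons, List.dropWhile_cons, hpop, decide_true, if_true,
          List.length_cons] at *
        rw [htw, hdw]
        rw [ih (t+1) (rest.dropWhile (fun y => decide (dayOf y.1 y.2 ≤ t + 1))) ex _
          (by omega)
          (fun y hy => hs y (List.mem_cons_of_mem _ ((List.dropWhile_sublist _).subset hy)))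
          (by
            intro y hy
            have := hf y (List.mem_cons_of_mem _ ((List.dropWhile_sublist _).subset hy))
            push_cast at this ⊢
            omega)
          (by
            intro h hh'
            have := head?_dropWhile_false hh'
            simp only [decide_eq_false_iff_not, not_le] at this
            exact this)]
        -- now both sides are ans ++ [cnt] ++ groups vs ans ++ groupDays (map dayOf (x :: rest))
        rw [groupDays]
        rw [List.takeWhile_map, List.dropWhile_map, hde]
        have hlen : ∀ (l : List (Int × Int)),
            (l.takeWhile ((fun d => decide (d ≤ t + 1)) ∘ fun y => dayOf y.1 y.2))
              = l.takeWhile (fun y => decide (dayOf y.1 y.2 ≤ t + 1)) := by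
          intro l; rfl
        rw [hlen]
        simp only [List.length_map, List.append_assoc, List.singleton_append]
        congr 2
        push_cast
        ring
      · -- nobody finishes at day t+1
        rw [if_neg hpop]
        have hd2 : t + 1 < dayOf x.1 x.2 := by
          by_contra hc
          exact hpop ((dayOf_le_iff hs1 ht1).mp (by omega))
        have := ih (t+1) (x :: rest) ex ans (by omega) hs
          (by
            intro y hy
            have := hf y hy
            push_cast at this ⊢
            omega)
          (by
            intro h hh'
            simp only [List.head?_cons, Option.some.injEq] at hh'
            subst hh'
            exact hd2)
        simpa using this

-- assembling the two argument lists into the pair list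
lemma zip_decompose : ∀ (ps ss : List Int), ps.length ≤ ss.length →
    (ps.zip ss).map Prod.snd ++ ss.drop ps.length = ss
  | [], ss, _ => by simp
  | p :: ps, s :: ss, h => by
    simp only [List.zip_cons_cons, List.map_cons, List.cons_append, List.length_cons,
      List.drop_succ_cons]
    rw [zip_decompose ps ss (by simpa using h)]
  | p :: ps, [], h => by simp at h

lemma fuel_bound_aux : ∀ (ps : List Int) (a : Nat),
    (∀ p ∈ ps, ((100 - p).toNat + 1) ≤ ps.foldl (fun a p => a + ((100 - p).toNat + 1)) a) ∧
    a ≤ ps.foldl (fun a p => a + ((100 - p).toNat + 1)) a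
  | [], a => ⟨by simp, le_refl a⟩
  | q :: ps, a => by
    obtain ⟨ih1, ih2⟩ := fuel_bound_aux ps (a + ((100 - q).toNat + 1))
    simp only [List.foldl_cons]
    refine ⟨?_, by omega⟩
    intro p hp
    rcases List.mem_cons.mp hp with h | h
    · subst h; omega
    · exact ih1 p h

-- ===== VERDICT (by name: the statement is the Claim_ definition above) =====
theorem solution_spec : Claim_equal_solution := by
  intro ps ss _hdom hpre
  obtain ⟨hlen, hsp⟩ := hpre
  unfold Spec_solution solution solution_alt
  have h0 : (ps.zip ss).map (valAt 0) = ps := by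
    have h1 : (ps.zip ss).map (valAt 0) = (ps.zip ss).map Prod.fst := by
      apply List.map_congr_left
      intro x _
      simp [valAt]
    rw [h1, List.map_fst_zip hlen]
  have h2 := zip_decompose ps ss hlen
  have := loopA_eq (ps.foldl (fun a p => a + ((100 - p).toNat + 1)) 0) 0 (ps.zip ss)
    (ss.drop ps.length) [] le_rfl hsp
    (by
      intro x hx
      obtain ⟨hx1, _⟩ := List.of_mem_zip hx
      have hb := dayOf_le_bound (p := x.1) (s := x.2) (hsp x hx)
      have hf := (fuel_bound_aux ps 0).1 x.1 hx1
      have : (((100 - x.1).toNat + 1 : Nat) : Int)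
          ≤ ((ps.foldl (fun a p => a + ((100 - p).toNat + 1)) 0 : Nat) : Int) := by
        exact_mod_cast hf
      omega)
    (by
      intro h _
      have := one_le_dayOf h.1 h.2
      omega)
  rw [h0, h2] at this
  simpa using this
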